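-- pv_equiv track=rewrite | github.com/paysenyu/emby-dedup | backend/app/services/rules_service.py | _normalize_categorical_priority
-- ===== SOURCE A (Python) =====
-- _CATEGORICAL_CHOICES: dict[str, list[str]] = {
--     "codec": ["AV1", "HEVC", "H.264", "VP9"],
--     "resolution": ["4K", "1080p", "720p", "480p"],
--     "effect": ["DoVi P8", "DoVi P7", "DoVi P5", "DoVi (Other)", "HDR10+", "HDR", "SDR"],
--     "subtitle": ["Chinese", "None"],
-- }
--
-- def _normalize_categorical_priority(rule_id: str, incoming: object) -> object:
--     choices = _CATEGORICAL_CHOICES.get(rule_id)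
--     if not choices:
--         return incoming
--
--     ordered: list[str] = []
--     if isinstance(incoming, list):
--         for value in incoming:
--             text = str(value or "").strip()
--             if text in choices and text not in ordered:
--                 ordered.append(text)
--
--     for choice in choices:
--         if choice not in ordered:
--             ordered.append(choice)
--
--     return ordered
-- ===== SOURCE B (Python) =====
-- _CATEGORICAL_CHOICES: dict[str, list[str]] = {
--     "codec": ["AV1", "HEVC", "H.264", "VP9"],
--     "resolution": ["4K", "1080p", "720p", "480p"],
--     "effect": ["DoVi P8", "DoVi P7", "DoVi P5", "DoVi (Other)", "HDR10+", "HDR", "SDR"],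
--     "subtitle": ["Chinese", "None"],
-- }
--
-- def _normalize_categorical_priority(rule_id: str, incoming: object) -> object:
--     choices = _CATEGORICAL_CHOICES.get(rule_id)
--     if not choices:
--         return incoming
--
--     # first-occurrence index of each normalized incoming value
--     index: dict[str, int] = {}
--     if isinstance(incoming, list):
--         for i, value in enumerate(incoming):
--             index.setdefault(str(value or "").strip(), i)
--
--     mentioned = sorted((c for c in choices if c in index), key=lambda c: index[c])
--     return mentioned + [c for c in choices if c not in index]
-- ===== Notes on version B (the rewrite author's own statement) =====
-- stated objective: alternative
-- what changed: B replaces A's two membership-scanning append loops by building a first-occurrence index dict once and producing the result as the mentioned choices sorted by that index plus the unmentioned choices filtered out in canonical order.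
-- outside the precondition, e.g. on _normalize_categorical_priority('other', None): A returns None, B returns None
import Mathlib
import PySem

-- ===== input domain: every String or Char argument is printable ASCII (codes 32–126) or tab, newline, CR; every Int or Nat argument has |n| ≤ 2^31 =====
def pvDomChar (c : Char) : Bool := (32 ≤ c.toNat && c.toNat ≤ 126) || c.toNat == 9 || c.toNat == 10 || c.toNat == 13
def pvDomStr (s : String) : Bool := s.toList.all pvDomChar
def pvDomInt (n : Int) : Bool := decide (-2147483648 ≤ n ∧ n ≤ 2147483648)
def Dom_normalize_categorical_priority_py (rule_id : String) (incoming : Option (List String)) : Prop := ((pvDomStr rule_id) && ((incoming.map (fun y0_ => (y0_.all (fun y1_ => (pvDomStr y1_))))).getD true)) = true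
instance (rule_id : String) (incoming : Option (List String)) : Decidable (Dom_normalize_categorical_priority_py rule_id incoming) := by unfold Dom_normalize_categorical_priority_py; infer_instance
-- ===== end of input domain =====

-- B builds a first-occurrence index dict once and returns the mentioned choices sorted by that
-- index followed by the unmentioned choices in canonical order, instead of A's two append loops
-- with membership scans (objective: alternative; return-value equivalence).

-- ===== PORT A =====
-- the module constant _CATEGORICAL_CHOICES (shared by both ports)
def pyChoicesTable : PySem.Dict String (List String) :=
  PySem.Dict.ofList
    [("codec", ["AV1", "HEVC", "H.264", "VP9"]),
     ("resolution", ["4K", "1080p", "720p", "480p"]),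
     ("effect", ["DoVi P8", "DoVi P7", "DoVi P5", "DoVi (Other)", "HDR10+", "HDR", "SDR"]),
     ("subtitle", ["Chinese", "None"])]

-- str(value or "").strip() on a string value (shared by both ports)
def pyNorm (v : String) : String := PySem.Str.strip (if v == "" then "" else v)

def normalize_categorical_priority_py (rule_id : String) (incoming : Option (List String)) : List String :=
  let choices := (pyChoicesTable.get? rule_id).getD []   -- 'not choices' ≡ lookup missing (the table's values are non-empty)
  if choices = [] then incoming.getD []                  -- 'return incoming' (incoming = none here is excluded by Pre_)
  else
    -- 'if isinstance(incoming, list)': none ⇒ the loop body never runs, modelled by folding over []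
    let ordered := (incoming.getD []).foldl (fun acc value =>
      let text := pyNorm value
      if choices.contains text && !(acc.contains text) then acc ++ [text] else acc) []
    choices.foldl (fun acc choice => if acc.contains choice then acc else acc ++ [choice]) ordered

-- ===== PORT B =====
def normalize_categorical_priority_py_alt (rule_id : String) (incoming : Option (List String)) : List String :=
  let choices := (pyChoicesTable.get? rule_id).getD []
  if choices = [] then incoming.getD []
  else
    -- index.setdefault(str(value or "").strip(), i) over enumerate(incoming)
    let index := (PySem.List.enumerate (incoming.getD []) 0).foldl
      (fun d p => d.setdefault (pyNorm p.2) p.1) PySem.Dict.empty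
    -- sorted((c for c in choices if c in index), key=lambda c: index[c]);
    -- index[c]: the key is present for every filtered c, so the getD default is never read
    PySem.List.sorted (choices.filter (fun c => index.contains c))
        (fun c => (index.get? c).getD 0) false
      ++ choices.filter (fun c => !(index.contains c))

-- ===== PRECONDITION & SPEC =====
-- Pre_ excludes only the inputs (rule_id not one of the four categorical rules, incoming = None)
-- on which A returns None — not a value of the declared list-of-strings return type.
def Pre_normalize_categorical_priority_py (rule_id : String) (incoming : Option (List String)) : Prop :=
  rule_id ∈ ["codec", "resolution", "effect", "subtitle"] ∨ incoming ≠ none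

instance (rule_id : String) (incoming : Option (List String)) : Decidable (Pre_normalize_categorical_priority_py rule_id incoming) := by unfold Pre_normalize_categorical_priority_py; infer_instance

def pvWitness_normalize_categorical_priority_py : String × Option (List String) :=
  ("codec", some [" HEVC ", "AV1", "x"])

def Spec_normalize_categorical_priority_py (rule_id : String) (incoming : Option (List String)) (out : List String) : Prop := out = normalize_categorical_priority_py_alt rule_id incoming
instance (rule_id : String) (incoming : Option (List String)) (out : List String) : Decidable (Spec_normalize_categorical_priority_py rule_id incoming out) := by unfold Spec_normalize_categorical_priority_py; infer_instance

-- ===== CLAIM (what is proved, stated in full; the proofs are below) =====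
def Claim_equal_normalize_categorical_priority_py : Prop := ∀ (rule_id : String) (incoming : Option (List String)), Dom_normalize_categorical_priority_py rule_id incoming → Pre_normalize_categorical_priority_py rule_id incoming → Spec_normalize_categorical_priority_py rule_id incoming (normalize_categorical_priority_py rule_id incoming)

-- ===== LEMMAS AND PROOFS =====

-- the Int key B sorts by: the first-occurrence index of c in l
def keyOf (l : List String) (c : String) : Int := ((PySem.List.index? l c).getD 0 : Nat)

-- A's first loop appends each normalized text at its first occurrence, provided it is a choice:
-- it is the ordered dedup followed by a filter
theorem foldA_eq (ch : List String) (l acc : List String) :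
    l.foldl (fun a t => if ch.contains t && !(a.contains t) then a ++ [t] else a) acc
      = acc ++ (PySem.Set.ofList l).filter (fun t => ch.contains t && !(acc.contains t)) := by
  induction l using List.reverseRecOn with
  | nil => simp [PySem.Set.ofList]
  | append_singleton l x ih =>
    rw [List.foldl_append, ih, PySem.Set.ofList_append_singleton]
    by_cases hx : x ∈ l
    · rw [PySem.Set.add_of_mem ((PySem.Set.mem_ofList _ _).mpr hx)]
      have hfalse : (ch.contains x && !((acc ++ (PySem.Set.ofList l).filter
          (fun t => ch.contains t && !(acc.contains t))).contains x)) = false := by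
        by_cases hca : x ∈ ch
        · by_cases hacc : x ∈ acc
          · simp [hacc]
          · have hxf : x ∈ (PySem.Set.ofList l).filter (fun t => ch.contains t && !(acc.contains t)) :=
              List.mem_filter.mpr ⟨(PySem.Set.mem_ofList _ _).mpr hx, by simp [hca, hacc]⟩
            simp
            tauto
        · simp [hca]
      simp only [List.foldl_cons, List.foldl_nil, hfalse, Bool.false_eq_true, if_false]
    · have hxf : x ∉ (PySem.Set.ofList l).filter (fun t => ch.contains t && !(acc.contains t)) :=
        fun h => hx ((PySem.Set.mem_ofList _ _).mp (List.mem_filter.mp h).1)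
      rw [PySem.Set.add_of_not_mem (fun h => hx ((PySem.Set.mem_ofList _ _).mp h))]
      by_cases hca : x ∈ ch <;> by_cases hacc : x ∈ acc <;>
        simp [List.filter_append, hca, hacc, hx, hxf, List.append_assoc]

-- A's second loop appends the missing choices: a filter, when the choices are distinct
theorem foldC_eq (l : List String) (acc : List String) (h : l.Nodup) :
    l.foldl (fun a c => if a.contains c then a else a ++ [c]) acc
      = acc ++ l.filter (fun c => !(acc.contains c)) := by
  induction l generalizing acc with
  | nil => simp
  | cons c l ih =>
    obtain ⟨hcl, hnd⟩ := List.nodup_cons.mp h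
    simp only [List.foldl_cons, List.filter_cons]
    by_cases hc : c ∈ acc
    · have step : (if acc.contains c then acc else acc ++ [c]) = acc := by simp [hc]
      have hpc : (!(acc.contains c)) = false := by simp [hc]
      rw [step, ih acc hnd, hpc]
      simp
    · have step : (if acc.contains c then acc else acc ++ [c]) = acc ++ [c] := by simp [hc]
      have hcongr : l.filter (fun b => !((acc ++ [c]).contains b)) = l.filter (fun b => !(acc.contains b)) := by
        refine List.filter_congr ?_
        intro b hb
        have hbc : b ≠ c := fun e => hcl (e ▸ hb)
        simp [hbc]
      rw [step, ih (acc ++ [c]) hnd, hcongr]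
      simp [hc, List.append_assoc]

-- B's setdefault loop records the first-occurrence index of each normalized text
theorem idx_get (T : List String) (s : Int) (d : PySem.Dict String Int) (t : String) :
    ((PySem.List.enumerate T s).foldl (fun d p => d.setdefault (pyNorm p.2) p.1) d).get? t
      = if d.contains t then d.get? t
        else (PySem.List.index? (T.map pyNorm) t).map (fun k => s + (k : Int)) := by
  induction T generalizing s d with
  | nil =>
    have hnone : PySem.List.index? ([] : List String) t = none :=
      (PySem.List.index?_eq_none_iff _ _).mpr (List.not_mem_nil)
    by_cases hd : d.contains t
    · simp [hd]
    · simp [hd, hnone, (PySem.Dict.get?_eq_none_iff_contains d t).mpr (by simpa using hd)]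
  | cons v T ih =>
    rw [PySem.List.enumerate_cons, List.foldl_cons, ih, List.map_cons]
    by_cases hd : d.contains t = true
    · have hc' : (d.setdefault (pyNorm v) s).contains t = true := by
        by_cases hk : d.contains (pyNorm v) = true
        · rw [PySem.Dict.setdefault_of_contains d _ hk]; exact hd
        · rw [PySem.Dict.setdefault_of_not_contains d _ (by simpa using hk),
            PySem.Dict.contains_insert]
          simp [hd]
      have hg' : (d.setdefault (pyNorm v) s).get? t = d.get? t := by
        by_cases hk : d.contains (pyNorm v) = true
        · rw [PySem.Dict.setdefault_of_contains d _ hk]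
        · have hne : t ≠ pyNorm v := by
            rintro rfl; rw [hd] at hk; exact hk rfl
          rw [PySem.Dict.setdefault_of_not_contains d _ (by simpa using hk),
            PySem.Dict.get?_insert]
          simp [hne]
      simp [hd, hc', hg']
    · by_cases ht : t = pyNorm v
      · have hd2 : d.contains (pyNorm v) = false := by rw [← ht]; simpa using hd
        rw [ht, PySem.Dict.setdefault_of_not_contains d _ hd2, PySem.List.index?_cons_self]
        have hc' : (d.insert (pyNorm v) s).contains (pyNorm v) = true := by
          rw [PySem.Dict.contains_insert]; simp
        have hg' : (d.insert (pyNorm v) s).get? (pyNorm v) = some s := by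
          rw [PySem.Dict.get?_insert]; simp
        simp [hc', hg', hd2]
      · have hc' : (d.setdefault (pyNorm v) s).contains t = d.contains t := by
          by_cases hk : d.contains (pyNorm v) = true
          · rw [PySem.Dict.setdefault_of_contains d _ hk]
          · rw [PySem.Dict.setdefault_of_not_contains d _ (by simpa using hk),
              PySem.Dict.contains_insert]
            simp [ht]
        have hg' : (d.setdefault (pyNorm v) s).get? t = d.get? t := by
          by_cases hk : d.contains (pyNorm v) = true
          · rw [PySem.Dict.setdefault_of_contains d _ hk]
          · rw [PySem.Dict.setdefault_of_not_contains d _ (by simpa using hk),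
              PySem.Dict.get?_insert]
            simp [ht]
        rw [PySem.List.index?_cons_of_ne _ (fun e => ht e.symm)]
        simp only [hc', hg', hd, Bool.false_eq_true, if_false, Option.map_map]
        cases PySem.List.index? (T.map pyNorm) t <;> simp
        push_cast; ring

-- the ordered dedup of a list is strictly increasing in first-occurrence index
theorem pairwise_keyOf (l : List String) :
    (PySem.Set.ofList l).Pairwise (fun a b => keyOf l a < keyOf l b) := by
  induction l using List.reverseRecOn with
  | nil => simp [PySem.Set.ofList]
  | append_singleton l x ih =>
    rw [PySem.Set.ofList_append_singleton]
    by_cases hx : x ∈ l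
    · rw [PySem.Set.add_of_mem ((PySem.Set.mem_ofList _ _).mpr hx)]
      refine ih.imp_of_mem ?_
      intro a b ha hb hr
      have ha' : a ∈ l := (PySem.Set.mem_ofList _ _).mp ha
      have hb' : b ∈ l := (PySem.Set.mem_ofList _ _).mp hb
      unfold keyOf
      rw [PySem.List.index?_append_of_mem _ ha', PySem.List.index?_append_of_mem _ hb']
      exact hr
    · rw [PySem.Set.add_of_not_mem (fun h => hx ((PySem.Set.mem_ofList _ _).mp h))]
      rw [List.pairwise_append]
      refine ⟨ih.imp_of_mem ?_, List.pairwise_singleton _ _, ?_⟩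
      · intro a b ha hb hr
        have ha' : a ∈ l := (PySem.Set.mem_ofList _ _).mp ha
        have hb' : b ∈ l := (PySem.Set.mem_ofList _ _).mp hb
        unfold keyOf
        rw [PySem.List.index?_append_of_mem _ ha', PySem.List.index?_append_of_mem _ hb']
        exact hr
      · intro a ha b hb
        rw [List.mem_singleton] at hb; subst hb
        have ha' : a ∈ l := (PySem.Set.mem_ofList _ _).mp ha
        obtain ⟨k, hk⟩ := Option.isSome_iff_exists.mp ((PySem.List.index?_isSome_iff l a).mpr ha')
        obtain ⟨hklt, -, -⟩ := PySem.List.getElem_of_index?_eq_some hk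
        unfold keyOf
        rw [PySem.List.index?_append_of_mem _ ha', PySem.List.index?_append_singleton_self l b hx, hk]
        simp; omega

-- the two else-branches agree for any duplicate-free choices list
theorem branch_eq (ch : List String) (hch : ch.Nodup) (T : List String) :
    (ch.foldl (fun acc c => if acc.contains c then acc else acc ++ [c])
        (T.foldl (fun acc v =>
          if ch.contains (pyNorm v) && !(acc.contains (pyNorm v)) then acc ++ [pyNorm v] else acc) []))
      = (PySem.List.sorted
            (ch.filter (fun c => ((PySem.List.enumerate T 0).foldl
                (fun d p => d.setdefault (pyNorm p.2) p.1) PySem.Dict.empty).contains c))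
            (fun c => (((PySem.List.enumerate T 0).foldl
                (fun d p => d.setdefault (pyNorm p.2) p.1) PySem.Dict.empty).get? c).getD 0) false
          ++ ch.filter (fun c => !(((PySem.List.enumerate T 0).foldl
                (fun d p => d.setdefault (pyNorm p.2) p.1) PySem.Dict.empty).contains c))) := by
  set I := (PySem.List.enumerate T 0).foldl (fun d p => d.setdefault (pyNorm p.2) p.1)
    PySem.Dict.empty with hI
  have hget : ∀ t, I.get? t
      = (PySem.List.index? (List.map pyNorm T) t).map (fun k => (k : Int)) := by
    intro t
    rw [hI, idx_get]
    simp [PySem.Dict.contains_empty]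
  have hcont : ∀ t, I.contains t = true ↔ t ∈ List.map pyNorm T := by
    intro t
    rw [PySem.Dict.contains_eq_isSome_get?, hget]
    cases hx : PySem.List.index? (List.map pyNorm T) t with
    | none =>
      have hn := (PySem.List.index?_eq_none_iff (List.map pyNorm T) t).mp hx
      simp [hn]
    | some k =>
      have hm : t ∈ List.map pyNorm T :=
        (PySem.List.index?_isSome_iff _ _).mp (by rw [hx]; rfl)
      simp [hm]
  have hkey : ∀ c, (I.get? c).getD 0 = keyOf (List.map pyNorm T) c := by
    intro c
    rw [hget]
    unfold keyOf
    cases PySem.List.index? (List.map pyNorm T) c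
    · simp
    · simp
  have hfm : (T.foldl (fun acc v =>
        if ch.contains (pyNorm v) && !(acc.contains (pyNorm v)) then acc ++ [pyNorm v] else acc) [])
      = (List.map pyNorm T).foldl (fun acc t =>
        if ch.contains t && !(acc.contains t) then acc ++ [t] else acc) [] :=
    (List.foldl_map (f := pyNorm)
      (g := fun acc t => if ch.contains t && !(acc.contains t) then acc ++ [t] else acc)
      (l := T) (init := ([] : List String))).symm
  rw [hfm, foldA_eq ch (List.map pyNorm T) [], List.nil_append]
  have hp : ((PySem.Set.ofList (List.map pyNorm T)).filter
        (fun t => ch.contains t && !(([] : List String).contains t)))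
      = (PySem.Set.ofList (List.map pyNorm T)).filter (fun t => ch.contains t) := by simp
  rw [hp, foldC_eq ch _ hch]
  set OA := (PySem.Set.ofList (List.map pyNorm T)).filter (fun t => ch.contains t) with hOA
  have hOAmem : ∀ c, c ∈ OA ↔ c ∈ ch ∧ c ∈ List.map pyNorm T := by
    intro c
    rw [hOA]
    simp [List.mem_filter, PySem.Set.mem_ofList, and_comm]
  have hOAnd : OA.Nodup := (PySem.Set.nodup_ofList (List.map pyNorm T)).filter _
  have h1 : PySem.List.sorted (ch.filter (fun c => I.contains c))
      (fun c => (I.get? c).getD 0) = OA := by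
    apply PySem.List.sorted_eq_of_perm_of_pairwise_lt
    · refine (List.perm_ext_iff_of_nodup hOAnd (hch.filter _)).mpr ?_
      intro a
      rw [hOAmem, List.mem_filter]
      constructor
      · rintro ⟨ha1, ha2⟩; exact ⟨ha1, by simp [(hcont a).mpr ha2]⟩
      · rintro ⟨ha1, ha2⟩; exact ⟨ha1, (hcont a).mp (by simpa using ha2)⟩
    · have h2 : OA.Pairwise (fun a b =>
          keyOf (List.map pyNorm T) a < keyOf (List.map pyNorm T) b) :=
        List.Pairwise.sublist List.filter_sublist (pairwise_keyOf (List.map pyNorm T))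
      simp only [hkey]
      exact h2
  rw [h1]
  congr 1
  refine List.filter_congr ?_
  intro c hcch
  cases hIc : I.contains c with
  | false =>
    have hno : c ∉ OA := by
      rw [hOAmem]
      rintro ⟨-, hts'⟩
      rw [(hcont c).mpr hts'] at hIc
      cases hIc
    simp [hno]
  | true =>
    have hyes : c ∈ OA := (hOAmem c).mpr ⟨hcch, (hcont c).mp hIc⟩
    simp [hyes]

-- ===== VERDICT (by name: the statement is the Claim_ definition above) =====
theorem normalize_categorical_priority_py_spec : Claim_equal_normalize_categorical_priority_py := by
  intro rule_id incoming _ _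
  unfold Spec_normalize_categorical_priority_py
  unfold normalize_categorical_priority_py normalize_categorical_priority_py_alt
  by_cases h1 : rule_id = "codec"
  · subst h1; exact branch_eq _ (by decide) _
  by_cases h2 : rule_id = "resolution"
  · subst h2; exact branch_eq _ (by decide) _
  by_cases h3 : rule_id = "effect"
  · subst h3; exact branch_eq _ (by decide) _
  by_cases h4 : rule_id = "subtitle"
  · subst h4; exact branch_eq _ (by decide) _
  have hkeys : pyChoicesTable.keys = ["codec", "resolution", "effect", "subtitle"] := by decide
  have hnone : pyChoicesTable.get? rule_id = none := by
    rw [PySem.Dict.get?_eq_none_iff_not_mem_keys, hkeys]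
    simp [h1, h2, h3, h4]
  simp [hnone]
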